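-- pv_equiv track=rewrite | github.com/J999UCL/connect4-zero | src/python/c4zero_train/symmetry.py | transform_bits
-- ===== SOURCE A (Python) =====
-- from enum import IntEnum
--
-- BOARD_SIZE = 4
--
-- class Symmetry(IntEnum):
--     IDENTITY = 0
--     ROT90 = 1
--     ROT180 = 2
--     ROT270 = 3
--     MIRROR_X = 4
--     MIRROR_Y = 5
--     DIAGONAL = 6
--     ANTI_DIAGONAL = 7
--
-- def transform_bits(bits: int, symmetry: Symmetry) -> int:
--     out = 0
--     for z in range(BOARD_SIZE):
--         for y in range(BOARD_SIZE):
--             for x in range(BOARD_SIZE):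
--                 source = cell_index(x, y, z)
--                 if bits & (1 << source):
--                     mapped_x, mapped_y = map_xy(x, y, symmetry)
--                     out |= 1 << cell_index(mapped_x, mapped_y, z)
--     return out
--
-- def map_xy(x: int, y: int, symmetry: Symmetry) -> tuple[int, int]:
--     if symmetry == Symmetry.IDENTITY:
--         return x, y
--     if symmetry == Symmetry.ROT90:
--         return 3 - y, x
--     if symmetry == Symmetry.ROT180:
--         return 3 - x, 3 - y
--     if symmetry == Symmetry.ROT270:
--         return y, 3 - x
--     if symmetry == Symmetry.MIRROR_X:
--         return 3 - x, y
--     if symmetry == Symmetry.MIRROR_Y: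
--         return x, 3 - y
--     if symmetry == Symmetry.DIAGONAL:
--         return y, x
--     if symmetry == Symmetry.ANTI_DIAGONAL:
--         return 3 - y, 3 - x
--     raise ValueError(f"unknown symmetry: {symmetry}")
--
-- def cell_index(x: int, y: int, z: int) -> int:
--     return z * 16 + y * 4 + x
-- ===== SOURCE B (Python) =====
-- from enum import IntEnum
--
-- BOARD_SIZE = 4
--
-- class Symmetry(IntEnum):
--     IDENTITY = 0
--     ROT90 = 1
--     ROT180 = 2
--     ROT270 = 3
--     MIRROR_X = 4
--     MIRROR_Y = 5
--     DIAGONAL = 6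
--     ANTI_DIAGONAL = 7
--
-- def transform_bits(bits: int, symmetry: Symmetry) -> int:
--     # Iterate only over the set bits of the (64-bit masked) board instead of
--     # scanning all 64 cells.
--     t = bits & 0xFFFFFFFFFFFFFFFF
--     out = 0
--     while t:
--         t2 = t & (t - 1)          # t with its lowest set bit cleared
--         low = t - t2              # the isolated lowest set bit
--         source = low.bit_length() - 1
--         z, r = divmod(source, 16)
--         y, x = divmod(r, 4)
--         mapped_x, mapped_y = map_xy(x, y, symmetry)
--         out |= 1 << cell_index(mapped_x, mapped_y, z)
--         t = t2
--     return out
--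
-- def map_xy(x: int, y: int, symmetry: Symmetry) -> tuple[int, int]:
--     if symmetry == Symmetry.IDENTITY:
--         return x, y
--     if symmetry == Symmetry.ROT90:
--         return 3 - y, x
--     if symmetry == Symmetry.ROT180:
--         return 3 - x, 3 - y
--     if symmetry == Symmetry.ROT270:
--         return y, 3 - x
--     if symmetry == Symmetry.DIAGONAL:
--         return y, x
--     if symmetry == Symmetry.ANTI_DIAGONAL:
--         return 3 - y, 3 - x
--     if symmetry == Symmetry.MIRROR_X:
--         return 3 - x, y
--     if symmetry == Symmetry.MIRROR_Y:
--         return x, 3 - y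
--     raise ValueError(f"unknown symmetry: {symmetry}")
--
-- def cell_index(x: int, y: int, z: int) -> int:
--     return z * 16 + y * 4 + x
-- ===== Notes on version B (the rewrite author's own statement) =====
-- stated objective: alternative
-- what changed: Instead of scanning all 64 cells with a triple nested loop and testing each cell's bit, B masks the board to 64 bits once and iterates only over its set bits (extracting and clearing the lowest set bit each round with t & (t-1)), decoding each set bit's source index to (x, y, z) before applying the same map_xy/cell_index mapping.
import Mathlib
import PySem

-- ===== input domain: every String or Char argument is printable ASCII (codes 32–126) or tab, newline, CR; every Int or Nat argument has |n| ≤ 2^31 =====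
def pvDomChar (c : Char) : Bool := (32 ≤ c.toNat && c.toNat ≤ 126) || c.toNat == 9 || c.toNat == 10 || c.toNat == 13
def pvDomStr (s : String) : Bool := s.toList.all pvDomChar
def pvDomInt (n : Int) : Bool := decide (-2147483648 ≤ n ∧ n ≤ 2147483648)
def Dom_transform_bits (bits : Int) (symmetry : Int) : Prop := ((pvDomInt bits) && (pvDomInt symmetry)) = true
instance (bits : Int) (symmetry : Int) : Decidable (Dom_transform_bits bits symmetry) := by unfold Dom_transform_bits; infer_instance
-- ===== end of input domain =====

-- B iterates only over the set bits of the 64-bit-masked board (clearing the lowest set bit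
-- each round) instead of scanning all 64 cells; same map_xy/cell_index semantics.

-- ===== PORT A =====
-- map_xy: `none` is exactly Python's `raise ValueError` branch
def mapXY (x : Int) (y : Int) (symmetry : Int) : Option (Int × Int) :=
  if symmetry = 0 then some (x, y)
  else if symmetry = 1 then some (3 - y, x)
  else if symmetry = 2 then some (3 - x, 3 - y)
  else if symmetry = 3 then some (y, 3 - x)
  else if symmetry = 4 then some (3 - x, y)
  else if symmetry = 5 then some (x, 3 - y)
  else if symmetry = 6 then some (y, x)
  else if symmetry = 7 then some (3 - y, 3 - x)
  else none

def cellIndex (x : Int) (y : Int) (z : Int) : Int := z * 16 + y * 4 + x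

-- triple `for` loop over range(4); accumulator is `Option Int`, `none` = ValueError was raised.
-- `1 << source` is ported as `1 <<< source.toNat`, exact here since source = z*16+y*4+x ≥ 0
-- for the loop values of x, y, z.
def transform_bits (bits : Int) (symmetry : Int) : Int :=
  ((PySem.List.pyRange 0 4 1).foldl (fun accZ z =>
      (PySem.List.pyRange 0 4 1).foldl (fun accY y =>
        (PySem.List.pyRange 0 4 1).foldl (fun accX x =>
          accX.bind (fun out =>
            let source := cellIndex x y z
            if PySem.Int.band bits ((1 : Int) <<< source.toNat) ≠ 0 then
              (mapXY x y symmetry).map (fun p =>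
                PySem.Int.bor out ((1 : Int) <<< (cellIndex p.1 p.2 z).toNat))
            else some out)) accY) accZ) (some 0)).getD 0

-- ===== PORT B =====
-- Source B's while loop; the loop variable t is kept as a Nat (exact: Source B masks bits to the low
-- 64 bits first, so its t is nonnegative throughout).  `low.bit_length() - 1` is
-- PySem.Int.bitLength - 1, and divmod on these nonnegative ints is Nat `/` `%` (exact here).
def loopB (symmetry : Int) (t : Nat) (out : Int) : Option Int :=
  if t = 0 then some out
  else
    let t2 := t &&& (t - 1)
    let low := t - t2
    let source := PySem.Int.bitLength (low : Int) - 1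
    let z := source / 16
    let r := source % 16
    let y := r / 4
    let x := r % 4
    match mapXY (x : Int) (y : Int) symmetry with
    | none => none
    | some p => loopB symmetry t2 (PySem.Int.bor out ((1 : Int) <<< (cellIndex p.1 p.2 (z : Int)).toNat))
termination_by t
decreasing_by
  have h1 : t &&& (t - 1) ≤ t - 1 := Nat.and_le_right
  omega

-- t = bits & 0xFFFFFFFFFFFFFFFF; nonnegative, so .toNat is exact
def transform_bits_alt (bits : Int) (symmetry : Int) : Int :=
  (loopB symmetry (PySem.Int.band bits 18446744073709551615).toNat 0).getD 0

-- ===== PRECONDITION & SPEC =====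
-- A raises ValueError iff symmetry ∉ {0..7} and some low-64 bit of bits is set; within the
-- |bits| ≤ 2^31 domain the latter is exactly bits ≠ 0, so Pre_ admits valid symmetries and,
-- for any symmetry, the empty board.
def Pre_transform_bits (bits : Int) (symmetry : Int) : Prop :=
  (0 ≤ symmetry ∧ symmetry ≤ 7) ∨ bits = 0

instance (bits : Int) (symmetry : Int) : Decidable (Pre_transform_bits bits symmetry) := by
  unfold Pre_transform_bits; infer_instance

def pvWitness_transform_bits : Int × Int := (5, 1)

def Spec_transform_bits (bits : Int) (symmetry : Int) (out : Int) : Prop := out = transform_bits_alt bits symmetry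
instance (bits : Int) (symmetry : Int) (out : Int) : Decidable (Spec_transform_bits bits symmetry out) := by unfold Spec_transform_bits; infer_instance

-- ===== CLAIM (what is proved, stated in full; the proofs are below) =====
def Claim_equal_transform_bits : Prop := ∀ (bits : Int) (symmetry : Int), Dom_transform_bits bits symmetry → Pre_transform_bits bits symmetry → Spec_transform_bits bits symmetry (transform_bits bits symmetry)

-- ===== LEMMAS AND PROOFS =====

-- mask contributed by a set source cell i (0 ≤ i < 64): x = i%16%4, y = i%16/4, z = i/16
def mskSrc (f : Int → Int → Int × Int) (i : Nat) : Int :=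
  (1 : Int) <<< (cellIndex (f ((i % 16 % 4 : Nat) : Int) ((i % 16 / 4 : Nat) : Int)).1
                   (f ((i % 16 % 4 : Nat) : Int) ((i % 16 / 4 : Nat) : Int)).2
                   ((i / 16 : Nat) : Int)).toNat

def stepT (bits : Int) (f : Int → Int → Int × Int) (acc : Int) (c : Int × Int × Int) : Int :=
  if PySem.Int.band bits ((1 : Int) <<< (cellIndex c.1 c.2.1 c.2.2).toNat) ≠ 0
  then PySem.Int.bor acc ((1 : Int) <<< (cellIndex (f c.1 c.2.1).1 (f c.1 c.2.1).2 c.2.2).toNat)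
  else acc

def stepA (bits : Int) (f : Int → Int → Int × Int) (acc : Int) (i : Nat) : Int :=
  if PySem.Int.band bits ((1 : Int) <<< i) ≠ 0 then PySem.Int.bor acc (mskSrc f i) else acc

def stepB (f : Int → Int → Int × Int) (m : Nat) (acc : Int) (i : Nat) : Int :=
  if m.testBit i then PySem.Int.bor acc (mskSrc f i) else acc

lemma tb_split (a b k i : Nat) (h : b < 2 ^ k) :
    (a * 2 ^ k + b).testBit i = if i < k then b.testBit i else a.testBit (i - k) := by
  by_cases hik : i < k
  · rw [if_pos hik]
    have hmod := Nat.testBit_mod_two_pow (a * 2 ^ k + b) k i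
    rw [Nat.mul_comm a (2 ^ k)] at hmod
    rw [Nat.mul_add_mod, Nat.mod_eq_of_lt h] at hmod
    simp only [hik, decide_true, Bool.true_and] at hmod
    rw [Nat.mul_comm (2 ^ k) a] at hmod
    exact hmod.symm
  · rw [if_neg hik]
    have hdiv : (a * 2 ^ k + b) / 2 ^ k = a := by
      rw [Nat.mul_comm a (2 ^ k), Nat.mul_add_div (Nat.two_pow_pos k), Nat.div_eq_of_lt h,
        Nat.add_zero]
    have htb := Nat.testBit_div_two_pow (n := k) (a * 2 ^ k + b) (i - k)
    rw [hdiv, Nat.sub_add_cancel (Nat.le_of_not_lt hik)] at htb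
    exact htb.symm

lemma tb_t (a j i : Nat) :
    (a * 2 ^ (j + 1) + 2 ^ j).testBit i =
      if i < j + 1 then decide (j = i) else a.testBit (i - (j + 1)) := by
  have h : 2 ^ j < 2 ^ (j + 1) := by
    have := Nat.two_pow_pos j
    rw [Nat.pow_succ]; omega
  rw [tb_split a (2 ^ j) (j + 1) i h]
  by_cases hi : i < j + 1 <;> simp [hi, Nat.testBit_two_pow]

lemma and_pred_eq (a j : Nat) :
    (a * 2 ^ (j + 1) + 2 ^ j) &&& (a * 2 ^ (j + 1) + 2 ^ j - 1) = a * 2 ^ (j + 1) := by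
  have hq := Nat.two_pow_pos j
  have hlt : 2 ^ j < 2 ^ (j + 1) := by rw [Nat.pow_succ]; omega
  have hpred : a * 2 ^ (j + 1) + 2 ^ j - 1 = a * 2 ^ (j + 1) + (2 ^ j - 1) := by
    generalize a * 2 ^ (j + 1) = A
    omega
  rw [hpred]
  apply Nat.eq_of_testBit_eq
  intro i
  rw [Nat.testBit_and, tb_split a (2 ^ j) (j + 1) i hlt,
    tb_split a (2 ^ j - 1) (j + 1) i (by omega)]
  conv_rhs => rw [← Nat.add_zero (a * 2 ^ (j + 1))]
  rw [tb_split a 0 (j + 1) i (Nat.two_pow_pos _)]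
  by_cases hi : i < j + 1
  · by_cases hji : j = i <;>
      simp [hi, hji, Nat.testBit_two_pow_sub_one, Nat.zero_testBit]
  · simp [hi]

lemma tb_sub : ∀ (i n k : Nat), k < 2 ^ n → i < n → (2 ^ n - 1 - k).testBit i = !k.testBit i := by
  intro i
  induction i with
  | zero =>
    intro n k hk hi
    obtain ⟨n', rfl⟩ : ∃ n', n = n' + 1 := ⟨n - 1, by omega⟩
    have h2 : 2 ^ (n' + 1) = 2 ^ n' * 2 := by rw [Nat.pow_succ]
    have hm : (2 ^ (n' + 1) - 1 - k) % 2 = 1 - k % 2 := by omega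
    rw [Nat.testBit_zero, Nat.testBit_zero, hm]
    rcases Nat.mod_two_eq_zero_or_one k with h | h <;> simp [h]
  | succ i ihw =>
    intro n k hk hi
    obtain ⟨n', rfl⟩ : ∃ n', n = n' + 1 := ⟨n - 1, by omega⟩
    have hp : 2 ^ (n' + 1) = 2 ^ n' * 2 := by rw [Nat.pow_succ]
    have hpos := Nat.two_pow_pos n'
    rw [Nat.testBit_add_one, Nat.testBit_add_one]
    have hdiv : (2 ^ (n' + 1) - 1 - k) / 2 = 2 ^ n' - 1 - k / 2 := by omega
    rw [hdiv]
    exact ihw n' (k / 2) (by omega) (by omega)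

lemma bitLength_two_pow (j : Nat) : PySem.Int.bitLength ((2 ^ j : Nat) : Int) = j + 1 := by
  have h1 := PySem.Int.lt_two_pow_bitLength ((2 ^ j : Nat) : Int)
  have h2 := PySem.Int.two_pow_bitLength_le ((2 ^ j : Nat) : Int)
    (by positivity)
  rw [Int.natAbs_natCast] at h1 h2
  have hbl : j < PySem.Int.bitLength ((2 ^ j : Nat) : Int) :=
    (Nat.pow_lt_pow_iff_right (by norm_num)).1 h1
  have hbl2 : PySem.Int.bitLength ((2 ^ j : Nat) : Int) - 1 ≤ j :=
    (Nat.pow_le_pow_iff_right (by norm_num)).1 h2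
  omega

lemma decomp (t : Nat) (h0 : t ≠ 0) : ∃ j a, t = a * 2 ^ (j + 1) + 2 ^ j := by
  obtain ⟨j, m, hodd, hm⟩ := Nat.exists_eq_two_pow_mul_odd h0
  obtain ⟨a, ha⟩ := hodd
  exact ⟨j, a, by subst hm ha; rw [Nat.pow_succ]; ring⟩

lemma fold_opt {α : Type} (F : Option Int → α → Option Int) (G : Int → α → Int) :
    ∀ (l : List α), (∀ w x, x ∈ l → F (some w) x = some (G w x)) →
      ∀ v, l.foldl F (some v) = some (l.foldl G v) := by
  intro l
  induction l with
  | nil => intro _ v; rfl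
  | cons x xs ih =>
    intro h v
    rw [List.foldl_cons, h v x List.mem_cons_self, List.foldl_cons]
    exact ih (fun w y hy => h w y (List.mem_cons_of_mem x hy)) _

lemma fold_clear (f : Int → Int → Int × Int) (a j : Nat) (hj : j < 64) (out : Int) :
    (List.range 64).foldl (stepB f (a * 2 ^ (j + 1) + 2 ^ j)) out =
      (List.range 64).foldl (stepB f (a * 2 ^ (j + 1)))
        (PySem.Int.bor out (mskSrc f j)) := by
  have h64 : (64 : Nat) = (j + 1) + (63 - j) := by omega
  rw [h64, List.range_add, List.foldl_append, List.foldl_append]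
  have hfirstL : (List.range (j + 1)).foldl (stepB f (a * 2 ^ (j + 1) + 2 ^ j)) out =
      PySem.Int.bor out (mskSrc f j) := by
    rw [List.range_succ, List.foldl_append]
    have hz : (List.range j).foldl (stepB f (a * 2 ^ (j + 1) + 2 ^ j)) out = out := by
      rw [PySem.List.foldl_congr_mem _ _ (fun acc _ => acc) _
        (fun acc x hx => by
          have hxj : x < j := List.mem_range.1 hx
          have hc : (a * 2 ^ (j + 1) + 2 ^ j).testBit x = false := by
            rw [tb_t, if_pos (by omega)]
            simp only [decide_eq_false_iff_not]
            omega
          simp [stepB, hc])]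
      exact List.foldl_fixed _
    rw [hz]
    simp [stepB, tb_t]
  have hfirstR : (List.range (j + 1)).foldl (stepB f (a * 2 ^ (j + 1)))
      (PySem.Int.bor out (mskSrc f j)) = PySem.Int.bor out (mskSrc f j) := by
    rw [PySem.List.foldl_congr_mem _ _ (fun acc _ => acc) _
      (fun acc x hx => by
        have hxj : x < j + 1 := List.mem_range.1 hx
        have hc : (a * 2 ^ (j + 1)).testBit x = false := by
          rw [Nat.testBit_mul_two_pow]
          simp only [Bool.and_eq_false_iff, decide_eq_false_iff_not]
          left; omega
        simp [stepB, hc])]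
    exact List.foldl_fixed _
  rw [hfirstL, hfirstR, List.foldl_map, List.foldl_map]
  apply PySem.List.foldl_congr_mem
  intro acc k _
  have h1 : (a * 2 ^ (j + 1) + 2 ^ j).testBit (j + 1 + k) = a.testBit k := by
    rw [tb_t, if_neg (by omega), show j + 1 + k - (j + 1) = k from by omega]
  have h2 : (a * 2 ^ (j + 1)).testBit (j + 1 + k) = a.testBit k := by
    rw [Nat.testBit_mul_two_pow, show j + 1 + k - (j + 1) = k from by omega]
    simp
  simp [stepB, h1, h2]

lemma loopB_eq (sym : Int) (f : Int → Int → Int × Int)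
    (hf : ∀ x y, mapXY x y sym = some (f x y)) :
    ∀ t, t < 2 ^ 64 → ∀ out : Int,
      loopB sym t out = some ((List.range 64).foldl (stepB f t) out) := by
  intro t
  induction t using Nat.strong_induction_on with
  | _ t IH =>
    intro ht out
    by_cases h0 : t = 0
    · subst h0
      have hz : (List.range 64).foldl (stepB f 0) out = out := by
        rw [PySem.List.foldl_congr_mem _ _ (fun acc _ => acc) _
          (fun acc x _ => by simp [stepB, Nat.zero_testBit])]
        exact List.foldl_fixed _
      rw [loopB, if_pos rfl, hz]
    · obtain ⟨j, a, hd⟩ := decomp t h0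
      have hq := Nat.two_pow_pos j
      have hand : t &&& (t - 1) = a * 2 ^ (j + 1) := by rw [hd]; exact and_pred_eq a j
      have hA : t = a * 2 ^ (j + 1) + 2 ^ j := hd
      have hlow : t - (t &&& (t - 1)) = 2 ^ j := by
        rw [hand]; omega
      have hlt2 : t &&& (t - 1) < t := by rw [hand]; omega
      have hj64 : j < 64 := by
        have hle : 2 ^ j ≤ t := by omega
        have : (2 : Nat) ^ j < 2 ^ 64 := lt_of_le_of_lt hle ht
        exact (Nat.pow_lt_pow_iff_right (by norm_num)).1 this
      rw [loopB, if_neg h0]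
      simp only [hlow, bitLength_two_pow, Nat.add_sub_cancel]
      rw [hf]
      simp only []
      rw [IH (t &&& (t - 1)) hlt2 (lt_trans hlt2 ht)
        (PySem.Int.bor out ((1 : Int) <<< (cellIndex (f ((j % 16 % 4 : Nat) : Int) ((j % 16 / 4 : Nat) : Int)).1
          (f ((j % 16 % 4 : Nat) : Int) ((j % 16 / 4 : Nat) : Int)).2 ((j / 16 : Nat) : Int)).toNat))]
      rw [hand, hA]
      rw [fold_clear f a j hj64 out]
      rfl

def tripleList : List (Int × Int × Int) :=
  ([0, 1, 2, 3] : List Int).flatMap (fun z =>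
    ([0, 1, 2, 3] : List Int).flatMap (fun y =>
      ([0, 1, 2, 3] : List Int).map (fun x => (x, y, z))))

lemma inner_x (bits sym : Int) (f : Int → Int → Int × Int)
    (hf : ∀ x y, mapXY x y sym = some (f x y)) (y z : Int) (l : List Int) (w : Int) :
    l.foldl (fun accX x => accX.bind (fun out =>
        let source := cellIndex x y z
        if PySem.Int.band bits (1 <<< source.toNat) ≠ 0 then
          (mapXY x y sym).map (fun p => PySem.Int.bor out (1 <<< (cellIndex p.1 p.2 z).toNat))
        else some out)) (some w)
      = some (l.foldl (fun acc x => stepT bits f acc (x, y, z)) w) := by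
  apply fold_opt
  intro w x _
  simp only [Option.bind_some, hf x y]
  by_cases h : PySem.Int.band bits ((1 : Int) <<< (cellIndex x y z).toNat) = 0 <;>
    simp [stepT, h]

lemma inner_y (bits sym : Int) (f : Int → Int → Int × Int)
    (hf : ∀ x y, mapXY x y sym = some (f x y)) (z : Int) (l : List Int) (w : Int) :
    l.foldl (fun accY y => ([0, 1, 2, 3] : List Int).foldl (fun accX x => accX.bind (fun out =>
        let source := cellIndex x y z
        if PySem.Int.band bits (1 <<< source.toNat) ≠ 0 then
          (mapXY x y sym).map (fun p => PySem.Int.bor out (1 <<< (cellIndex p.1 p.2 z).toNat))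
        else some out)) accY) (some w)
      = some (l.foldl (fun acc y =>
          ([0, 1, 2, 3] : List Int).foldl (fun acc' x => stepT bits f acc' (x, y, z)) acc) w) := by
  apply fold_opt
  intro w y _
  exact inner_x bits sym f hf y z _ w

lemma A_flat (bits sym : Int) (f : Int → Int → Int × Int)
    (hf : ∀ x y, mapXY x y sym = some (f x y)) :
    transform_bits bits sym = tripleList.foldl (stepT bits f) 0 := by
  unfold transform_bits
  rw [show PySem.List.pyRange 0 4 1 = ([0, 1, 2, 3] : List Int) from by decide]
  rw [fold_opt _ (fun acc z => ([0, 1, 2, 3] : List Int).foldl (fun acc' y =>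
        ([0, 1, 2, 3] : List Int).foldl (fun acc'' x => stepT bits f acc'' (x, y, z)) acc') acc)
      ([0, 1, 2, 3] : List Int) (fun w z _ => inner_y bits sym f hf z _ w) 0]
  rw [Option.getD_some]
  unfold tripleList
  rw [List.foldl_flatMap]
  apply PySem.List.foldl_congr_mem
  intro acc z _
  rw [List.foldl_flatMap]
  apply PySem.List.foldl_congr_mem
  intro acc' y _
  rw [List.foldl_map]

lemma encode_decode (i : Nat) :
    (cellIndex ((i % 16 % 4 : Nat) : Int) ((i % 16 / 4 : Nat) : Int) ((i / 16 : Nat) : Int)).toNat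
      = i := by
  unfold cellIndex
  rw [show ((i / 16 : Nat) : Int) * 16 + ((i % 16 / 4 : Nat) : Int) * 4 + ((i % 16 % 4 : Nat) : Int)
      = ((i / 16 * 16 + i % 16 / 4 * 4 + i % 16 % 4 : Nat) : Int) from by push_cast; ring,
    Int.toNat_natCast]
  omega

lemma tripleList_eq : tripleList = (List.range 64).map (fun i =>
    (((i % 16 % 4 : Nat) : Int), ((i % 16 / 4 : Nat) : Int), ((i / 16 : Nat) : Int))) := by decide

lemma A_norm (bits sym : Int) (f : Int → Int → Int × Int)
    (hf : ∀ x y, mapXY x y sym = some (f x y)) :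
    transform_bits bits sym = (List.range 64).foldl (stepA bits f) 0 := by
  rw [A_flat bits sym f hf, tripleList_eq, List.foldl_map]
  apply PySem.List.foldl_congr_mem
  intro acc i _
  simp only [stepT, stepA, mskSrc, encode_decode i]

lemma band_m_of_nonneg (bits : Int) (hb : 0 ≤ bits) :
    (PySem.Int.band bits 18446744073709551615).toNat = bits.toNat &&& (2 ^ 64 - 1) := by
  rw [show (18446744073709551615 : Int) = ((2 ^ 64 - 1 : Nat) : Int) from by norm_num]
  conv_lhs => rw [← Int.toNat_of_nonneg hb]
  rw [PySem.Int.band_natCast, Int.toNat_natCast]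

lemma band_m_of_neg (bits : Int) (hb : bits < 0) (hlo : -2147483648 ≤ bits) :
    (PySem.Int.band bits 18446744073709551615).toNat = 2 ^ 64 - 1 - (-bits - 1).toNat := by
  have hk : (-bits - 1).toNat < 2 ^ 64 := by omega
  have hband : PySem.Int.band bits 18446744073709551615 =
      (((18446744073709551615 : Int).toNat - ((18446744073709551615 : Int).toNat &&& (-bits - 1).toNat) : Nat) : Int) := by
    rw [PySem.Int.band, if_neg (by omega), if_pos (by norm_num)]
  rw [hband, Int.toNat_natCast]
  rw [show (18446744073709551615 : Int).toNat = 2 ^ 64 - 1 from by rfl]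
  congr 1
  apply Nat.eq_of_testBit_eq
  intro i
  rw [Nat.testBit_and, Nat.testBit_two_pow_sub_one]
  by_cases hi : i < 64
  · simp [hi]
  · have htb : (-bits - 1).toNat.testBit i = false :=
      Nat.testBit_lt_two_pow
        (lt_of_lt_of_le hk (Nat.pow_le_pow_right (by norm_num) (Nat.le_of_not_lt hi)))
    simp only [hi, decide_false, Bool.false_and]
    exact htb.symm

lemma cond_iff (bits : Int) (hlo : -2147483648 ≤ bits) (hhi : bits ≤ 2147483648)
    (i : Nat) (hi : i < 64) :
    (PySem.Int.band bits ((1 : Int) <<< i) ≠ 0) ↔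
      ((PySem.Int.band bits 18446744073709551615).toNat.testBit i = true) := by
  have hpow : ((1 : Int) <<< i) = ((2 ^ i : Nat) : Int) := by
    rw [Int.shiftLeft_eq, one_mul]; push_cast; ring
  by_cases hb : 0 ≤ bits
  · rw [band_m_of_nonneg bits hb, hpow]
    conv_lhs => rw [← Int.toNat_of_nonneg hb]
    rw [PySem.Int.band_natCast, Nat.testBit_and, Nat.testBit_two_pow_sub_one]
    rcases h : bits.toNat.testBit i <;> simp [Nat.and_two_pow, h, hi]
  · have hbn : bits < 0 := by omega
    have hk : (-bits - 1).toNat < 2 ^ 64 := by omega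
    have hband : PySem.Int.band bits ((2 ^ i : Nat) : Int) =
        ((((2 ^ i : Nat) : Int).toNat - (((2 ^ i : Nat) : Int).toNat &&& (-bits - 1).toNat) : Nat) : Int) := by
      rw [PySem.Int.band, if_neg (by omega), if_pos (by positivity)]
    rw [band_m_of_neg bits hbn hlo, hpow, hband, Int.toNat_natCast,
      tb_sub i 64 (-bits - 1).toNat hk hi, Nat.and_comm]
    rcases h : (-bits - 1).toNat.testBit i <;> rw [Nat.and_two_pow, h] <;> simp

lemma band_zero_left (b : Int) : PySem.Int.band 0 b = 0 := by
  rw [PySem.Int.band_comm, PySem.Int.band_zero]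

lemma A_zero (sym : Int) : transform_bits 0 sym = 0 := by
  unfold transform_bits
  rw [fold_opt _ (fun acc _ => acc) _ (fun w z _ => by
      rw [fold_opt _ (fun acc _ => acc) _ (fun w' y _ => by
          rw [fold_opt _ (fun acc _ => acc) _ (fun w'' x _ => by
              simp [band_zero_left]) w']
          rw [List.foldl_fixed]) w]
      rw [List.foldl_fixed]) 0]
  rw [List.foldl_fixed, Option.getD_some]

lemma B_zero (sym : Int) : transform_bits_alt 0 sym = 0 := by
  unfold transform_bits_alt
  rw [band_zero_left]
  rw [show (0 : Int).toNat = 0 from rfl, loopB, if_pos rfl, Option.getD_some]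

lemma master (bits sym : Int) (hlo : -2147483648 ≤ bits) (hhi : bits ≤ 2147483648)
    (f : Int → Int → Int × Int) (hf : ∀ x y, mapXY x y sym = some (f x y)) :
    transform_bits bits sym = transform_bits_alt bits sym := by
  have hm64 : (PySem.Int.band bits 18446744073709551615).toNat < 2 ^ 64 := by
    by_cases hb : 0 ≤ bits
    · rw [band_m_of_nonneg bits hb]
      have := Nat.and_le_right (n := bits.toNat) (m := 2 ^ 64 - 1)
      omega
    · rw [band_m_of_neg bits (by omega) hlo]
      omega
  unfold transform_bits_alt
  rw [loopB_eq sym f hf _ hm64 0, Option.getD_some, A_norm bits sym f hf]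
  apply PySem.List.foldl_congr_mem
  intro acc i hi
  have hi64 : i < 64 := List.mem_range.1 hi
  have hc := cond_iff bits hlo hhi i hi64
  by_cases h : (PySem.Int.band bits 18446744073709551615).toNat.testBit i
  · rw [stepA, stepB, if_pos (hc.2 h), if_pos h]
  · rw [stepA, stepB, if_neg (fun hh => h (hc.1 hh)), if_neg (by simpa using h)]


-- ===== VERDICT (by name: the statement is the Claim_ definition above) =====
theorem transform_bits_spec : Claim_equal_transform_bits := by
  intro bits sym hdom hpre
  unfold Spec_transform_bits
  have hdom' : -2147483648 ≤ bits ∧ bits ≤ 2147483648 := by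
    simp only [Dom_transform_bits, pvDomInt, Bool.and_eq_true, decide_eq_true_eq] at hdom
    exact hdom.1
  rcases hpre with ⟨h0, h7⟩ | rfl
  · refine master _ _ hdom'.1 hdom'.2 (fun x y => (mapXY x y sym).getD (0, 0)) ?_
    intro x y
    interval_cases sym <;> simp [mapXY]
  · rw [A_zero, B_zero]
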